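-- pv_equiv track=rewrite | github.com/SPOOKEXE/AnotherRobloxPixelRenderer | src/media.py | _greedy_fill_extended
-- ===== SOURCE A (Python) =====
-- def _greedy_fill( pixels, startIndex ) -> tuple[int, list]:
-- 	color_value = pixels[startIndex]
-- 	want_this_color = str(color_value)
-- 	count = 1
-- 	while startIndex < len(pixels) - 1:
-- 		startIndex += 1
-- 		value = pixels[ startIndex ]
-- 		if str( value ) == want_this_color:
-- 			count += 1
-- 		else:
-- 			break
-- 	return count, color_value
--
-- def _greedy_fill_extended( pixels ) -> str:
-- 	new_pixels = []
-- 	index = 1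
-- 	while index < len(pixels):
-- 		count, fill_color = _greedy_fill( pixels, index )
-- 		fill_color = fill_color[:3]
-- 		if count > 2:
-- 			new_pixels.append('x'+str(count))
-- 			new_pixels.extend(fill_color[:3])
-- 			index += count
-- 		else:
-- 			new_pixels.extend(fill_color[:3])
-- 			index += 1
-- 	return str(new_pixels).replace(" ", "")
-- ===== SOURCE B (Python) =====
-- def _greedy_fill_extended(pixels) -> str:
-- 	# Phase 1: group consecutive str-equal pixels of pixels[1:] in one pass.
-- 	groups = []
-- 	for p in pixels[1:]:
-- 		if groups and str(groups[-1][0]) == str(p):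
-- 			groups[-1].append(p)
-- 		else:
-- 			groups.append([p])
-- 	# Phase 2: emit run-length output per group.
-- 	new_pixels = []
-- 	for g in groups:
-- 		if len(g) > 2:
-- 			new_pixels.append('x' + str(len(g)))
-- 			new_pixels.extend(g[0][:3])
-- 		else:
-- 			for p in g:
-- 				new_pixels.extend(p[:3])
-- 	return str(new_pixels).replace(" ", "")
-- ===== Notes on version B (the rewrite author's own statement) =====
-- stated objective: idiomatic
-- what changed: Replaced A's re-scanning _greedy_fill helper (which re-counts each run from every index) by a two-phase pass: build the list of consecutive-equal groups once, then emit the run-length items per group.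
import Mathlib
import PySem

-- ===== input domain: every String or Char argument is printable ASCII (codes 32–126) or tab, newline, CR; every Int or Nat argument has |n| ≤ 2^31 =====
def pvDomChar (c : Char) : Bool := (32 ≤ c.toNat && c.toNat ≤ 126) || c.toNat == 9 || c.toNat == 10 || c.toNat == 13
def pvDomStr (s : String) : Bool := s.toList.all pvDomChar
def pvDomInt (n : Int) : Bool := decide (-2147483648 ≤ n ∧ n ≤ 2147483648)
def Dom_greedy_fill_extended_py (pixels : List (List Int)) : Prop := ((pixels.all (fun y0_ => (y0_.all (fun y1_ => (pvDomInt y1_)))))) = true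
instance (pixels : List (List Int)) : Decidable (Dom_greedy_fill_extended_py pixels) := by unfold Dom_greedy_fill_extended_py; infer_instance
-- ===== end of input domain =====

-- B replaces A's re-scanning _greedy_fill helper by a two-phase pass: build the list of
-- consecutive-equal groups once, then emit the run-length items per group (objective: idiomatic).
-- Both ports render str(new_pixels).replace(" ","") via pvFmt; str-equality of two lists of
-- Python ints holds iff the lists are equal, so the ports compare the lists directly.

-- str(new_pixels).replace(" ", "") where new_pixels mixes already-rendered items:
-- "['x3',1,2]" — exact for items that contain no spaces.
def pvFmt (items : List String) : String := "[" ++ String.intercalate "," items ++ "]"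

-- ===== PORT A =====
-- inner while loop of _greedy_fill (returns the final count)
def pvGfLoop (pixels : List (List Int)) (want : List Int) (i count : Nat) : Nat :=
  if i < pixels.length - 1 then
    let v := pixels.getD (i + 1) []
    if v = want then pvGfLoop pixels want (i + 1) (count + 1) else count
  else count
termination_by pixels.length - 1 - i

-- _greedy_fill: (count, color_value)
def pvGreedyFill (pixels : List (List Int)) (startIndex : Nat) : Nat × List Int :=
  let color := pixels.getD startIndex []
  (pvGfLoop pixels color startIndex 1, color)

-- outer while loop of _greedy_fill_extended; items are rendered as str() would print them
def pvGfeLoop (pixels : List (List Int)) (index : Nat) (acc : List String) : List String :=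
  if index < pixels.length then
    let count := (pvGreedyFill pixels index).1
    let fill3 := (pvGreedyFill pixels index).2.take 3
    if h : count > 2 then
      pvGfeLoop pixels (index + count) (acc ++ ("'x" ++ toString count ++ "'") :: fill3.map PySem.Int.toStr)
    else
      pvGfeLoop pixels (index + 1) (acc ++ fill3.map PySem.Int.toStr)
  else acc
termination_by pixels.length - index

def greedy_fill_extended_py (pixels : List (List Int)) : String :=
  pvFmt (pvGfeLoop pixels 1 [])

-- ===== PORT B =====
-- phase 1: group consecutive equal pixels (append to the last group, as Source B does)
def pvGroupStep (gs : List (List (List Int))) (p : List Int) : List (List (List Int)) :=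
  match gs.getLast? with
  | some g => if g.headD [] = p then gs.dropLast ++ [g ++ [p]] else gs ++ [[p]]
  | none => [[p]]

def pvGroups (pixels : List (List Int)) : List (List (List Int)) :=
  (pixels.drop 1).foldl pvGroupStep []

-- phase 2: emit one group's items
def pvEmitGroup (g : List (List Int)) : List String :=
  if g.length > 2 then
    ("'x" ++ toString g.length ++ "'") :: ((g.headD []).take 3).map PySem.Int.toStr
  else
    g.foldl (fun acc p => acc ++ (p.take 3).map PySem.Int.toStr) []

def greedy_fill_extended_py_alt (pixels : List (List Int)) : String :=
  pvFmt ((pvGroups pixels).foldl (fun acc g => acc ++ pvEmitGroup g) [])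

-- ===== PRECONDITION & SPEC =====
def Spec_greedy_fill_extended_py (pixels : List (List Int)) (out : String) : Prop := out = greedy_fill_extended_py_alt pixels
instance (pixels : List (List Int)) (out : String) : Decidable (Spec_greedy_fill_extended_py pixels out) := by unfold Spec_greedy_fill_extended_py; infer_instance

-- ===== CLAIM (what is proved, stated in full; the proofs are below) =====
def Claim_equal_greedy_fill_extended_py : Prop := ∀ (pixels : List (List Int)), Dom_greedy_fill_extended_py pixels → Spec_greedy_fill_extended_py pixels (greedy_fill_extended_py pixels)

-- ===== LEMMAS AND PROOFS =====

-- runs of consecutive equal elements (spec-level)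
def pvRuns : List (List Int) → List (List (List Int))
  | [] => []
  | v :: t => (v :: t.takeWhile (· == v)) :: pvRuns (t.dropWhile (· == v))
  termination_by l => l.length
  decreasing_by simpa using Nat.lt_succ_of_le (List.length_dropWhile_le _ _)

-- the output items, following A's advance-by-count / advance-by-one recursion
def pvEmitList : List (List Int) → List String
  | [] => []
  | v :: t =>
    if (t.takeWhile (· == v)).length + 1 > 2 then
      ("'x" ++ toString ((t.takeWhile (· == v)).length + 1) ++ "'") ::
        ((v.take 3).map PySem.Int.toStr ++ pvEmitList (t.dropWhile (· == v)))
    else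
      (v.take 3).map PySem.Int.toStr ++ pvEmitList t
  termination_by l => l.length
  decreasing_by
    · simpa using Nat.lt_succ_of_le (List.length_dropWhile_le _ _)
    · simp

theorem pvRuns_cons (v : List Int) (t : List (List Int)) :
    pvRuns (v :: t) = (v :: t.takeWhile (· == v)) :: pvRuns (t.dropWhile (· == v)) := by
  rw [pvRuns]

theorem pv_dropWhile_eq_drop (p : List Int → Bool) (l : List (List Int)) :
    l.dropWhile p = l.drop (l.takeWhile p).length := by
  induction l with
  | nil => rfl
  | cons v t ih =>
    by_cases h : p v <;> simp [List.dropWhile_cons, List.takeWhile_cons, h, ih]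

theorem pv_dropWhile_of_takeWhile_nil (p : List Int → Bool) (l : List (List Int))
    (h : l.takeWhile p = []) : l.dropWhile p = l := by
  rw [pv_dropWhile_eq_drop, h]; rfl

theorem pv_drop_cons (pixels : List (List Int)) (i : Nat) (h : i < pixels.length) :
    pixels.drop i = pixels.getD i [] :: pixels.drop (i + 1) := by
  rw [List.drop_eq_getElem_cons h, List.getD_eq_getElem pixels [] h]

theorem pvGfLoop_eq (pixels : List (List Int)) (want : List Int) (i c : Nat) :
    pvGfLoop pixels want i c = c + ((pixels.drop (i + 1)).takeWhile (· == want)).length := by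
  fun_induction pvGfLoop pixels want i c with
  | case1 i c h v hv ih =>
    rw [ih, pv_drop_cons pixels (i + 1) (by omega)]
    simp only [List.takeWhile_cons]
    have hb : (pixels.getD (i + 1) [] == want) = true := by simpa [v] using hv
    rw [hb]; simp; omega
  | case2 i c h v hv =>
    rw [pv_drop_cons pixels (i + 1) (by omega)]
    simp only [List.takeWhile_cons]
    have hb : (pixels.getD (i + 1) [] == want) = false := by simpa [v] using hv
    rw [hb]; simp
  | case3 i c h =>
    rw [List.drop_eq_nil_of_le (by omega)]; simp

theorem pvGfeLoop_eq (pixels : List (List Int)) (index : Nat) (acc : List String) :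
    pvGfeLoop pixels index acc = acc ++ pvEmitList (pixels.drop index) := by
  fun_induction pvGfeLoop pixels index acc with
  | case1 index acc h count fill3 hc ih =>
    rw [ih]
    have hd := pv_drop_cons pixels index h
    have hcount : count = (((pixels.drop (index + 1)).takeWhile (· == pixels.getD index [])).length) + 1 := by
      simp only [count, pvGreedyFill, pvGfLoop_eq]; omega
    have hdropc : pixels.drop (index + count) =
        (pixels.drop (index + 1)).dropWhile (· == pixels.getD index []) := by
      rw [pv_dropWhile_eq_drop, List.drop_drop]
      congr 1; omega
    rw [hdropc, hd, pvEmitList,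
      if_pos (by omega : ((pixels.drop (index + 1)).takeWhile (· == pixels.getD index [])).length + 1 > 2),
      ← hcount]
    have hfill : fill3 = (pixels.getD index []).take 3 := rfl
    rw [hfill]
    simp [List.append_assoc]
  | case2 index acc h count fill3 hc ih =>
    rw [ih]
    have hd := pv_drop_cons pixels index h
    have hcount : count = (((pixels.drop (index + 1)).takeWhile (· == pixels.getD index [])).length) + 1 := by
      simp only [count, pvGreedyFill, pvGfLoop_eq]; omega
    rw [hd, pvEmitList,
      if_neg (by omega : ¬ ((pixels.drop (index + 1)).takeWhile (· == pixels.getD index [])).length + 1 > 2)]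
    have hfill : fill3 = (pixels.getD index []).take 3 := rfl
    rw [hfill]
    simp [List.append_assoc]
  | case3 index acc h =>
    rw [List.drop_eq_nil_of_le (by omega)]
    simp [pvEmitList]

theorem pvGroups_foldl (l : List (List Int)) :
    ∀ (gs : List (List (List Int))) (a : List Int) (r : List (List Int)) (v : List Int),
      a = v → (∀ p ∈ r, p = v) →
      l.foldl pvGroupStep (gs ++ [a :: r]) =
        gs ++ ((a :: r) ++ l.takeWhile (· == v)) :: pvRuns (l.dropWhile (· == v)) := by
  induction l with
  | nil => intro gs a r v _ _; simp [pvRuns]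
  | cons p t ih =>
    intro gs a r v ha hall
    have hlast : (gs ++ [a :: r]).getLast? = some (a :: r) := by simp
    have hdl : (gs ++ [a :: r]).dropLast = gs := by simp
    by_cases he : v = p
    · have step : pvGroupStep (gs ++ [a :: r]) p = gs ++ [a :: (r ++ [p])] := by
        simp [pvGroupStep, hlast, hdl, ha, he]
      have hall' : ∀ q ∈ r ++ [p], q = v := by
        intro q hq
        rcases List.mem_append.mp hq with hq | hq
        · exact hall q hq
        · simp at hq; rw [hq, ← he]
      rw [List.foldl_cons, step, ih gs a (r ++ [p]) v ha hall']
      have hp : (p == v) = true := by simp [he.symm]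
      simp [List.takeWhile_cons, List.dropWhile_cons, hp, List.append_assoc]
    · have step : pvGroupStep (gs ++ [a :: r]) p = (gs ++ [a :: r]) ++ [[p]] := by
        simp [pvGroupStep, hlast, ha]
        intro hc; exact he hc
      rw [List.foldl_cons, step, ih (gs ++ [a :: r]) p [] p rfl (by simp)]
      have hp : (p == v) = false := by
        simp; intro hc; exact he hc.symm
      simp [List.takeWhile_cons, List.dropWhile_cons, hp, pvRuns_cons, List.append_assoc]

theorem pvGroups_eq (pixels : List (List Int)) :
    pvGroups pixels = pvRuns (pixels.drop 1) := by
  unfold pvGroups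
  cases hd : pixels.drop 1 with
  | nil => simp [pvRuns]
  | cons v t =>
    have step : pvGroupStep [] v = [] ++ [v :: ([] : List (List Int))] := by
      simp [pvGroupStep]
    rw [List.foldl_cons, step, pvGroups_foldl t [] v [] v rfl (by simp), pvRuns_cons]
    simp

theorem pvEmitGroup_small (v : List Int) (tw : List (List Int)) (hlen : tw.length + 1 ≤ 2) :
    pvEmitGroup (v :: tw) =
      (v :: tw).flatMap (fun p => (p.take 3).map PySem.Int.toStr) := by
  unfold pvEmitGroup
  rw [if_neg (by simp; omega)]
  rw [PySem.List.foldl_append_eq_flatMap]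
  simp

theorem pvFlatMap_runs (l : List (List Int)) :
    (pvRuns l).flatMap pvEmitGroup = pvEmitList l := by
  fun_induction pvRuns l with
  | case1 => simp [pvEmitList]
  | case2 v t ih =>
    rw [List.flatMap_cons, ih]
    by_cases hk : (t.takeWhile (· == v)).length + 1 > 2
    · rw [pvEmitList, if_pos hk]
      unfold pvEmitGroup
      rw [if_pos (by simp; omega)]
      simp
    · cases htw : t.takeWhile (· == v) with
      | nil =>
        conv_rhs => rw [pvEmitList]
        rw [htw, if_neg (by simp), pvEmitGroup_small v [] (by simp),
          pv_dropWhile_of_takeWhile_nil _ _ htw]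
        rw [pv_dropWhile_of_takeWhile_nil _ _ htw] at ih
        simp [ih]
      | cons w tw' =>
        have hk' := hk; rw [htw] at hk'
        have hlen := congrArg List.length htw
        have htw0 : tw' = [] := by
          simp at hlen hk'
          cases tw' with
          | nil => rfl
          | cons _ _ => simp at hlen; omega
        subst htw0
        cases t with
        | nil => simp at htw
        | cons w0 t' =>
          rw [List.takeWhile_cons] at htw
          have hb : (w0 == v) = true := by
            by_contra hb
            rw [if_neg (by simpa using hb)] at htw
            simp at htw
          rw [if_pos (by exact hb)] at htw
          injection htw with hw0 htw'
          subst hw0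
          have hveq : w0 = v := by simpa using hb
          have htk : (w0 :: t').takeWhile (· == v) = [w0] := by
            rw [List.takeWhile_cons, if_pos (by exact hb), htw']
          have hdw : (w0 :: t').dropWhile (· == v) = t' := by
            rw [List.dropWhile_cons, if_pos (by exact hb)]
            exact pv_dropWhile_of_takeWhile_nil _ _ htw'
          rw [hdw] at ih ⊢
          conv_rhs => rw [pvEmitList]
          rw [htk, if_neg (by simp)]
          conv_rhs => rw [pvEmitList]
          have htk' : t'.takeWhile (· == w0) = [] := by rw [hveq]; exact htw'
          rw [htk', if_neg (by simp)]
          rw [pvEmitGroup_small v [w0] (by simp)]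
          simp [ih, hveq]

-- ===== VERDICT (by name: the statement is the Claim_ definition above) =====
theorem greedy_fill_extended_py_spec : Claim_equal_greedy_fill_extended_py := by
  intro pixels _
  unfold Spec_greedy_fill_extended_py greedy_fill_extended_py greedy_fill_extended_py_alt
  rw [pvGfeLoop_eq, pvGroups_eq, PySem.List.foldl_append_eq_flatMap, pvFlatMap_runs]
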